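-- pv_equiv track=rewrite | github.com/ApoloLoxias/BPPress | src/test_htmlnode.py | generate_dicts
-- ===== SOURCE A (Python) =====
-- def generate_dicts(keys: list[str], values: list[str]) -> list[dict]:
--     output = [{}]
--     kvpairs = list(zip(keys, values))
--     for k, v in kvpairs:
--         dics = []
--         for dic in output:
--             new_dic = dic.copy()
--             new_dic[k] = v
--             dics.append(new_dic)
--         output.extend(dics)
--     return output
-- ===== SOURCE B (Python) =====
-- def generate_dicts(keys: list[str], values: list[str]) -> list[dict]:
--     pairs = list(zip(keys, values))
--     out = []
--     for mask in range(2 ** len(pairs)):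
--         d = {}
--         for i, (k, v) in enumerate(pairs):
--             if (mask >> i) & 1:
--                 d[k] = v
--         out.append(d)
--     return out
-- ===== Notes on version B (the rewrite author's own statement) =====
-- stated objective: alternative
-- what changed: Enumerates subsets directly by bitmask index (one fresh dict per mask, bits read low-to-high) instead of doubling a growing list of dict copies.
import Mathlib
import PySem

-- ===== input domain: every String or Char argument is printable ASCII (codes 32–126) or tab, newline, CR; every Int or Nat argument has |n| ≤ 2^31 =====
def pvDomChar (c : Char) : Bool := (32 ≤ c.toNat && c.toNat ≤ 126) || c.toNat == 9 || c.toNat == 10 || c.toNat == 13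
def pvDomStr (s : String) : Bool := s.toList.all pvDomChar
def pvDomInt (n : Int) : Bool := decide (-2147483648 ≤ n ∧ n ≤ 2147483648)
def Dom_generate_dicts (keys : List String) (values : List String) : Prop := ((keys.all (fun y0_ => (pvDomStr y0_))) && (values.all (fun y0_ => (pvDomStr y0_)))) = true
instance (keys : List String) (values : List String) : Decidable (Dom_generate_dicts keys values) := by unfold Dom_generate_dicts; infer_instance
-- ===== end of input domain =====

-- B enumerates subsets directly by bitmask index instead of A's doubling of a growing list of dict copies; same cost, alternative algorithm.

-- ===== PORT A =====
-- for k, v in kvpairs: dics = [dic.copy() with new_dic[k]=v for dic in output]; output.extend(dics)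
def generate_dicts (keys : List String) (values : List String) : List (List (String × String)) :=
  let kvpairs := keys.zip values
  let output := kvpairs.foldl
    (fun output kv => output ++ output.map (fun dic => dic.insert kv.1 kv.2))
    [(PySem.Dict.empty : PySem.Dict String String)]
  output.map PySem.Dict.items

-- ===== PORT B =====
-- inner loop of Source B: for i, (k, v) in enumerate(pairs): if (mask >> i) & 1: d[k] = v
def pvBuild (mask : Nat) : List (String × String) → Nat → PySem.Dict String String → PySem.Dict String String
  | [], _, d => d
  | (k, v) :: rest, i, d => pvBuild mask rest (i + 1) (if mask.testBit i then d.insert k v else d)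

def generate_dicts_alt (keys : List String) (values : List String) : List (List (String × String)) :=
  let pairs := keys.zip values
  (List.range (2 ^ pairs.length)).map
    (fun mask => (pvBuild mask pairs 0 PySem.Dict.empty).items)

-- ===== PRECONDITION & SPEC =====
def Spec_generate_dicts (keys : List String) (values : List String) (out : List (List (String × String))) : Prop := out = generate_dicts_alt keys values
instance (keys : List String) (values : List String) (out : List (List (String × String))) : Decidable (Spec_generate_dicts keys values out) := by unfold Spec_generate_dicts; infer_instance

-- ===== CLAIM (what is proved, stated in full; the proofs are below) =====
def Claim_equal_generate_dicts : Prop := ∀ (keys : List String) (values : List String), Dom_generate_dicts keys values → Spec_generate_dicts keys values (generate_dicts keys values)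

-- ===== LEMMAS AND PROOFS =====

-- pvBuild only reads bits i, …, i + p.length - 1 of the mask
theorem pvBuild_congr (m1 m2 : Nat) (p : List (String × String)) :
    ∀ (i : Nat) (d : PySem.Dict String String),
      (∀ j, i ≤ j → j < i + p.length → m1.testBit j = m2.testBit j) →
      pvBuild m1 p i d = pvBuild m2 p i d := by
  induction p with
  | nil => intro i d _; rfl
  | cons kv rest ih =>
    intro i d h
    obtain ⟨k, v⟩ := kv
    simp only [pvBuild]
    rw [h i (le_refl i) (by simp only [List.length_cons]; omega)]
    exact ih (i + 1) _ (fun j hj1 hj2 => h j (by omega) (by simp only [List.length_cons]; omega))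

-- appending one pair: the extra bit is read last
theorem pvBuild_append (m : Nat) (p : List (String × String)) (x : String × String) :
    ∀ (i : Nat) (d : PySem.Dict String String),
      pvBuild m (p ++ [x]) i d =
        (if m.testBit (i + p.length) then (pvBuild m p i d).insert x.1 x.2 else pvBuild m p i d) := by
  induction p with
  | nil => intro i d; simp [pvBuild]
  | cons kv rest ih =>
    intro i d
    obtain ⟨k, v⟩ := kv
    simp only [List.cons_append, pvBuild, List.length_cons]
    rw [ih]
    have : i + 1 + rest.length = i + (rest.length + 1) := by omega
    rw [this]

-- the main correspondence between the doubling fold and bitmask enumeration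
theorem grow_eq_masks (p : List (String × String)) :
    p.foldl (fun output kv => output ++ output.map (fun dic => dic.insert kv.1 kv.2))
      [(PySem.Dict.empty : PySem.Dict String String)]
    = (List.range (2 ^ p.length)).map (fun mask => pvBuild mask p 0 PySem.Dict.empty) := by
  induction p using List.reverseRecOn with
  | nil => rfl
  | append_singleton p x ih =>
    rw [List.foldl_append, List.foldl_cons, List.foldl_nil, ih]
    have hlen : (p ++ [x]).length = p.length + 1 := by simp
    rw [hlen, pow_succ, Nat.mul_two, List.range_add]
    rw [List.map_append, List.map_map, List.map_map]
    congr 1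
    · -- first half: masks < 2^n have bit n clear
      apply List.map_congr_left
      intro m hm
      rw [List.mem_range] at hm
      rw [pvBuild_append, Nat.zero_add, Nat.testBit_lt_two_pow hm, if_neg (by simp)]
    · -- second half: mask = 2^n + m has bit n set and agrees with m below n
      apply List.map_congr_left
      intro m hm
      rw [List.mem_range] at hm
      simp only [Function.comp]
      rw [pvBuild_append, Nat.zero_add, Nat.testBit_two_pow_add_eq,
        Nat.testBit_lt_two_pow hm, Bool.not_false, if_pos rfl]
      congr 1
      exact pvBuild_congr _ _ p 0 _ (fun j _ hj =>
        (Nat.testBit_two_pow_add_gt (by omega : j < p.length) m).symm)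

-- ===== VERDICT (by name: the statement is the Claim_ definition above) =====
theorem generate_dicts_spec : Claim_equal_generate_dicts := by
  intro keys values _
  unfold Spec_generate_dicts generate_dicts generate_dicts_alt
  simp only []
  rw [grow_eq_masks, List.map_map]
  rfl
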